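-- pv_equiv track=rewrite | github.com/Harmedox/cuga-agent | src/cuga/backend/server/workspace_sandbox.py | _collect_dir_and_file_sets
-- ===== SOURCE A (Python) =====
-- def _hidden_parts(parts: tuple[str, ...]) -> bool:
--     return any(p.startswith(".") for p in parts)
--
-- def _rel_parts(sandbox_root: str, abs_path: str) -> tuple[str, ...]:
--     root = sandbox_root.rstrip("/")
--     ap = abs_path.strip().rstrip("/")
--     if ap == root:
--         return tuple()
--     prefix = root + "/"
--     if not ap.startswith(prefix):
--         raise ValueError(abs_path)
--     rel = ap[len(prefix) :]
--     return tuple(rel.split("/")) if rel else tuple()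
--
-- def _collect_dir_and_file_sets(
--     dir_lines: list[str], file_lines: list[str], sandbox_root: str
-- ) -> tuple[set[tuple[str, ...]], set[tuple[str, ...]]]:
--     dir_rels: set[tuple[str, ...]] = set()
--     file_rels: set[tuple[str, ...]] = set()
--     for raw in dir_lines:
--         try:
--             parts = _rel_parts(sandbox_root, raw)
--         except ValueError:
--             continue
--         if _hidden_parts(parts):
--             continue
--         dir_rels.add(parts)
--         for i in range(1, len(parts)):
--             dir_rels.add(parts[:i])
--     for raw in file_lines:
--         try:
--             parts = _rel_parts(sandbox_root, raw)
--         except ValueError: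
--             continue
--         if _hidden_parts(parts):
--             continue
--         file_rels.add(parts)
--         for i in range(1, len(parts)):
--             dir_rels.add(parts[:i])
--     return dir_rels, file_rels
-- ===== SOURCE B (Python) =====
-- def _hidden_parts(parts):
--     return any(p.startswith(".") for p in parts)
--
--
-- def _rel_parts(sandbox_root, abs_path):
--     root = sandbox_root.rstrip("/")
--     ap = abs_path.strip().rstrip("/")
--     if ap == root:
--         return tuple()
--     prefix = root + "/"
--     if not ap.startswith(prefix):
--         raise ValueError(abs_path)
--     rel = ap[len(prefix):]
--     return tuple(rel.split("/")) if rel else tuple()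
--
--
-- def _visible(sandbox_root, raw):
--     """Leaf tuple for one listing line, or None if outside the root or hidden."""
--     try:
--         parts = _rel_parts(sandbox_root, raw)
--     except ValueError:
--         return None
--     return None if _hidden_parts(parts) else parts
--
--
-- def _ancestors(parts):
--     """All proper non-empty prefixes of parts, ascending, by recursing on the parent."""
--     if len(parts) <= 1:
--         return []
--     parent = parts[:-1]
--     return _ancestors(parent) + [parent]
--
--
-- def _collect_dir_and_file_sets(dir_lines, file_lines, sandbox_root):
--     # One merged, tagged pass over both listings, then bulk set construction:
--     # directories contribute themselves plus their ancestors to the dir set,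
--     # files contribute only their ancestors there and themselves to the file set.
--     tagged = []
--     for is_dir, lines in ((True, dir_lines), (False, file_lines)):
--         for raw in lines:
--             parts = _visible(sandbox_root, raw)
--             if parts is not None:
--                 tagged.append((parts, is_dir))
--     dir_stream = [q for parts, is_dir in tagged
--                   for q in (([parts] if is_dir else []) + _ancestors(parts))]
--     file_leaves = [parts for parts, is_dir in tagged if not is_dir]
--     return set(dir_stream), set(file_leaves)
-- ===== Notes on version B (the rewrite author's own statement) =====
-- stated objective: alternative
-- what changed: Replaces A's two incremental try/except loops that set.add the leaf and its index-sliced prefixes per line by one merged tagged pass collecting visible leaves, a recursive walk-up-the-parent ancestor computation (parts[:-1] recursion instead of parts[:i] range slicing), and bulk set construction from the resulting streams.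
import Mathlib
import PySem

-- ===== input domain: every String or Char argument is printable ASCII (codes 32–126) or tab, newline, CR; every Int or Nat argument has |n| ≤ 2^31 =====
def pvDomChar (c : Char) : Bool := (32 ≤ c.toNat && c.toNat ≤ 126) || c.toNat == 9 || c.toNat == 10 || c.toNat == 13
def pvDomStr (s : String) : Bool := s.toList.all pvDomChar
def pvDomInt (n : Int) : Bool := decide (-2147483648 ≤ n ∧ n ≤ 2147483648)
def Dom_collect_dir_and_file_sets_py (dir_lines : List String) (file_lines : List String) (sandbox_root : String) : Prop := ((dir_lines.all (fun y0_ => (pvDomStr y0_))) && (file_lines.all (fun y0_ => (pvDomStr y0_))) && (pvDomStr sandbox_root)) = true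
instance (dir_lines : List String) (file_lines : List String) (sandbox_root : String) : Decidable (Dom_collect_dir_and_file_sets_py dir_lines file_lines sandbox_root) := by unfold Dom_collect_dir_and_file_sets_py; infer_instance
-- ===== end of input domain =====

-- B replaces A's two incremental try/except loops (per-line set.add of the leaf and its
-- index-sliced prefixes) by one merged tagged pass collecting leaves, a recursive
-- walk-up-the-parent ancestor computation, and bulk set construction; objective: alternative.

-- ===== PORT A =====
-- str.rstrip("/") ported by hand (PySem has no rstrip-with-chars): drop every trailing '/'; exact.
def pvRstripSlash (cs : List Char) : List Char := (cs.reverse.dropWhile (· == '/')).reverse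

-- _rel_parts: 'some parts' where Python returns a tuple, 'none' where it raises ValueError.
def pvRelParts? (sandbox_root : String) (abs_path : String) : Option (List String) :=
  let root := pvRstripSlash sandbox_root.toList
  let ap := pvRstripSlash (PySem.Chars.strip abs_path.toList)
  if ap = root then some []
  else
    let pre := root ++ ['/']
    if PySem.Chars.startswith ap pre then
      let rel := ap.drop pre.length
      if rel = [] then some []
      else some ((PySem.Chars.splitOn rel ['/']).map (fun cs => String.ofList cs))
    else none

def pvHiddenParts (parts : List String) : Bool :=
  parts.any (fun p => PySem.Chars.startswith p.toList ['.'])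

def collect_dir_and_file_sets_py (dir_lines : List String) (file_lines : List String) (sandbox_root : String) : List (List String) × List (List String) :=
  let st1 : PySem.Set (List String) × PySem.Set (List String) :=
    dir_lines.foldl (fun st raw =>
      match pvRelParts? sandbox_root raw with
      | none => st
      | some parts =>
        if pvHiddenParts parts then st
        else
          let d := PySem.Set.add st.1 parts
          let d := (PySem.List.pyRange 1 (parts.length : Int) 1).foldl
            (fun d i => PySem.Set.add d (PySem.List.slice parts none (some i))) d
          (d, st.2)) (PySem.Set.empty, PySem.Set.empty)
  let st2 : PySem.Set (List String) × PySem.Set (List String) :=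
    file_lines.foldl (fun st raw =>
      match pvRelParts? sandbox_root raw with
      | none => st
      | some parts =>
        if pvHiddenParts parts then st
        else
          let f := PySem.Set.add st.2 parts
          let d := (PySem.List.pyRange 1 (parts.length : Int) 1).foldl
            (fun d i => PySem.Set.add d (PySem.List.slice parts none (some i))) st.1
          (d, f)) st1
  st2

-- ===== PORT B =====
-- _visible: leaf tuple for one listing line, or none if outside the root or hidden.
def pvVisibleParts? (sandbox_root : String) (raw : String) : Option (List String) :=
  match pvRelParts? sandbox_root raw with
  | none => none
  | some parts => if pvHiddenParts parts then none else some parts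

-- _ancestors: all proper non-empty prefixes, ascending, by recursing on the parent.
def pvAncestors (parts : List String) : List (List String) :=
  if parts.length ≤ 1 then []
  else pvAncestors parts.dropLast ++ [parts.dropLast]
termination_by parts.length
decreasing_by simp only [List.length_dropLast]; omega

def collect_dir_and_file_sets_py_alt (dir_lines : List String) (file_lines : List String) (sandbox_root : String) : List (List String) × List (List String) :=
  let tagged : List (List String × Bool) :=
    [(true, dir_lines), (false, file_lines)].flatMap
      (fun tl => tl.2.filterMap (fun raw =>
        (pvVisibleParts? sandbox_root raw).map (fun p => (p, tl.1))))
  let dirStream := tagged.flatMap (fun pt =>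
    (if pt.2 then [pt.1] else []) ++ pvAncestors pt.1)
  let fileLeaves := (tagged.filter (fun pt => !pt.2)).map (fun pt => pt.1)
  (PySem.Set.ofList dirStream, PySem.Set.ofList fileLeaves)

-- ===== PRECONDITION & SPEC =====
def Spec_collect_dir_and_file_sets_py (dir_lines : List String) (file_lines : List String) (sandbox_root : String) (out : List (List String) × List (List String)) : Prop := out = collect_dir_and_file_sets_py_alt dir_lines file_lines sandbox_root
instance (dir_lines : List String) (file_lines : List String) (sandbox_root : String) (out : List (List String) × List (List String)) : Decidable (Spec_collect_dir_and_file_sets_py dir_lines file_lines sandbox_root out) := by unfold Spec_collect_dir_and_file_sets_py; infer_instance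

-- ===== CLAIM (what is proved, stated in full; the proofs are below) =====
def Claim_equal_collect_dir_and_file_sets_py : Prop := ∀ (dir_lines : List String) (file_lines : List String) (sandbox_root : String), Dom_collect_dir_and_file_sets_py dir_lines file_lines sandbox_root → Spec_collect_dir_and_file_sets_py dir_lines file_lines sandbox_root (collect_dir_and_file_sets_py dir_lines file_lines sandbox_root)

-- ===== LEMMAS AND PROOFS =====

-- proof-side helper: the leaf followed by its proper prefixes, ascending (A's per-line chunk).
def pvWithPrefixes (parts : List String) : List (List String) :=
  parts :: (PySem.List.pyRange 1 (parts.length : Int) 1).map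
    (fun i => PySem.List.slice parts none (some i))

-- B's recursive walk-up ancestors are exactly A's ascending index slices.
theorem pvAncestors_eq (p : List String) :
    pvAncestors p = (PySem.List.pyRange 1 (p.length : Int) 1).map
      (fun i => PySem.List.slice p none (some i)) := by
  fun_induction pvAncestors p with
  | case1 p h =>
    rw [PySem.List.pyRange_one_eq_nil (by omega : (p.length : Int) ≤ 1)]
    simp
  | case2 p h ih =>
    have hm : 2 ≤ p.length := by omega
    have hq : (p.dropLast.length : Int) = (p.length : Int) - 1 := by
      rw [List.length_dropLast]; omega
    rw [ih, hq]
    have hsplit : PySem.List.pyRange 1 (p.length : Int) 1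
        = PySem.List.pyRange 1 ((p.length : Int) - 1) 1 ++ [(p.length : Int) - 1] := by
      have := PySem.List.pyRange_one_succ_right
        (a := 1) (b := (p.length : Int) - 1) (by omega)
      simpa using this
    rw [hsplit, List.map_append]
    congr 1
    · apply List.map_congr_left
      intro i hi
      rw [PySem.List.pyRange_one] at hi
      simp only [List.mem_map, List.mem_range] at hi
      obtain ⟨k, hk, rfl⟩ := hi
      have h0 : (0 : Int) ≤ 1 + (k : Int) := by omega
      have hkk : (1 + (k : Int)).toNat ≤ p.length - 1 := by omega
      rw [PySem.List.slice_to _ h0, PySem.List.slice_to _ h0,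
        List.dropLast_eq_take, List.take_take]
      congr 1
      omega
    · simp only [List.map_cons, List.map_nil]
      rw [PySem.List.slice_to _ (by omega : (0:Int) ≤ (p.length : Int) - 1)]
      have ht : ((p.length : Int) - 1).toNat = p.length - 1 := by omega
      rw [ht, ← List.dropLast_eq_take]

-- hence per-leaf: leaf plus ancestors is A's chunk, ancestors alone its tail.
theorem pvAncestors_chunk (p : List String) :
    p :: pvAncestors p = pvWithPrefixes p := by
  rw [pvAncestors_eq]; rfl

theorem pvAncestors_tail (p : List String) :
    pvAncestors p = (pvWithPrefixes p).drop 1 := by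
  rw [pvAncestors_eq]; rfl

-- A's per-line dir update (add the leaf, then fold adds over the sliced prefixes)
-- is a fold of Set.add over the pvWithPrefixes chunk.
theorem pvChunkStep (d : PySem.Set (List String)) (parts : List String) :
    (PySem.List.pyRange 1 (parts.length : Int) 1).foldl
      (fun d i => PySem.Set.add d (PySem.List.slice parts none (some i)))
      (PySem.Set.add d parts)
    = List.foldl PySem.Set.add d (pvWithPrefixes parts) := by
  simp [pvWithPrefixes, List.foldl_map]

-- same for the prefixes-only chunk used with file lines
theorem pvChunkStepTail (d : PySem.Set (List String)) (parts : List String) :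
    (PySem.List.pyRange 1 (parts.length : Int) 1).foldl
      (fun d i => PySem.Set.add d (PySem.List.slice parts none (some i))) d
    = List.foldl PySem.Set.add d ((pvWithPrefixes parts).drop 1) := by
  simp [pvWithPrefixes, List.foldl_map]

-- A's first loop, characterised: it folds the flattened dir chunk stream into the
-- dir set and leaves the file set untouched.
theorem pvDirLoop (sr : String) (ls : List String)
    (d f : PySem.Set (List String)) :
    ls.foldl (fun st raw =>
      match pvRelParts? sr raw with
      | none => st
      | some parts =>
        if pvHiddenParts parts then st
        else
          let d := PySem.Set.add st.1 parts
          let d := (PySem.List.pyRange 1 (parts.length : Int) 1).foldl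
            (fun d i => PySem.Set.add d (PySem.List.slice parts none (some i))) d
          (d, st.2)) (d, f)
    = (List.foldl PySem.Set.add d
        ((ls.filterMap (fun r => pvVisibleParts? sr r)).flatMap pvWithPrefixes), f) := by
  induction ls generalizing d with
  | nil => simp
  | cons x xs ih =>
    simp only [List.foldl_cons, List.filterMap_cons]
    cases h : pvRelParts? sr x with
    | none => simp [pvVisibleParts?, h, ih]
    | some parts =>
      by_cases hh : pvHiddenParts parts
      · simp [pvVisibleParts?, h, hh, ih]
      · simp only [pvVisibleParts?, h, hh, Bool.false_eq_true, not_false_iff, if_neg]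
        rw [pvChunkStep, ih]
        simp [List.foldl_append, pvVisibleParts?]

-- A's second loop, characterised: it folds the file leaves into the file set and
-- the prefix chunks into the dir set.
theorem pvFileLoop (sr : String) (ls : List String)
    (d f : PySem.Set (List String)) :
    ls.foldl (fun st raw =>
      match pvRelParts? sr raw with
      | none => st
      | some parts =>
        if pvHiddenParts parts then st
        else
          let f := PySem.Set.add st.2 parts
          let d := (PySem.List.pyRange 1 (parts.length : Int) 1).foldl
            (fun d i => PySem.Set.add d (PySem.List.slice parts none (some i))) st.1
          (d, f)) (d, f)
    = (List.foldl PySem.Set.add d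
        ((ls.filterMap (fun r => pvVisibleParts? sr r)).flatMap
          (fun p => (pvWithPrefixes p).drop 1)),
       List.foldl PySem.Set.add f (ls.filterMap (fun r => pvVisibleParts? sr r))) := by
  induction ls generalizing d f with
  | nil => simp
  | cons x xs ih =>
    simp only [List.foldl_cons, List.filterMap_cons]
    cases h : pvRelParts? sr x with
    | none => simp [pvVisibleParts?, h, ih]
    | some parts =>
      by_cases hh : pvHiddenParts parts
      · simp [pvVisibleParts?, h, hh, ih]
      · simp only [pvVisibleParts?, h, hh, Bool.false_eq_true, not_false_iff, if_neg]
        rw [pvChunkStepTail, ih]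
        simp [List.foldl_append, pvVisibleParts?]

-- B's merged tagged pass, characterised: the dir stream is the dir chunks followed by
-- the file prefix chunks, and the file leaves are recovered from the tags.
theorem pvAltStreams (dl fl : List String) (sr : String) :
    collect_dir_and_file_sets_py_alt dl fl sr
    = (PySem.Set.ofList ((dl.filterMap (fun r => pvVisibleParts? sr r)).flatMap pvWithPrefixes
        ++ (fl.filterMap (fun r => pvVisibleParts? sr r)).flatMap (fun p => (pvWithPrefixes p).drop 1)),
       PySem.Set.ofList (fl.filterMap (fun r => pvVisibleParts? sr r))) := by
  unfold collect_dir_and_file_sets_py_alt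
  simp only [List.flatMap_cons, List.flatMap_nil, List.append_nil,
    ← List.map_filterMap, List.flatMap_append, List.flatMap_map,
    List.filter_append, List.filter_map, List.map_append, List.map_map]
  simp only [Function.comp_def, Bool.not_true, Bool.not_false, List.filter_false,
    List.filter_true, List.map_nil, List.nil_append]
  have h1 : (fun a : List String => (if True then [a] else []) ++ pvAncestors a)
      = pvWithPrefixes := funext fun p => by simp [pvAncestors_chunk p]
  have h2 : (fun a : List String => (if false = true then [a] else []) ++ pvAncestors a)
      = fun p => (pvWithPrefixes p).drop 1 := funext fun p => by simp [pvAncestors_tail p]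
  rw [h1, h2]
  simp

-- ===== VERDICT (by name: the statement is the Claim_ definition above) =====
theorem collect_dir_and_file_sets_py_spec : Claim_equal_collect_dir_and_file_sets_py := by
  intro dir_lines file_lines sandbox_root _
  show _ = _
  rw [pvAltStreams]
  unfold collect_dir_and_file_sets_py
  simp only [pvDirLoop, pvFileLoop, PySem.Set.ofList_eq_foldl, PySem.Set.empty,
    List.foldl_append]
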